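-- pv_equiv track=rewrite | github.com/alexvking/segment | wordseg/eval.py | get_intervals
-- ===== SOURCE A (Python) =====
-- def get_intervals(words):
--     """
--     Converts a list of words into a set of (start, end) intervals.
--     Assumes words are concatenated to form the underlying string.
--     """
--     intervals = set()
--     current_idx = 0
--     for w in words:
--         start = current_idx
--         end = start + len(w)
--         intervals.add((start, end))
--         current_idx = end
--     return intervals
-- ===== SOURCE B (Python) =====
-- def get_intervals(words):
--     """
--     Converts a list of words into a set of (start, end) intervals.
--     Assumes words are concatenated to form the underlying string.
--     Divide and conquer: solve each half, shift the right half's intervals.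
--     """
--     if not words:
--         return set()
--     if len(words) == 1:
--         return {(0, len(words[0]))}
--     mid = len(words) // 2
--     left = words[:mid]
--     right = words[mid:]
--     shift = sum(len(w) for w in left)
--     return get_intervals(left) | {(s + shift, e + shift) for s, e in get_intervals(right)}
-- ===== Notes on version B (the rewrite author's own statement) =====
-- stated objective: alternative
-- what changed: Replaces the left-to-right running-position accumulator loop with divide and conquer: split the word list in half, solve each half recursively, shift the right half's intervals by the left half's total length, and union the two sets.
import Mathlib
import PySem

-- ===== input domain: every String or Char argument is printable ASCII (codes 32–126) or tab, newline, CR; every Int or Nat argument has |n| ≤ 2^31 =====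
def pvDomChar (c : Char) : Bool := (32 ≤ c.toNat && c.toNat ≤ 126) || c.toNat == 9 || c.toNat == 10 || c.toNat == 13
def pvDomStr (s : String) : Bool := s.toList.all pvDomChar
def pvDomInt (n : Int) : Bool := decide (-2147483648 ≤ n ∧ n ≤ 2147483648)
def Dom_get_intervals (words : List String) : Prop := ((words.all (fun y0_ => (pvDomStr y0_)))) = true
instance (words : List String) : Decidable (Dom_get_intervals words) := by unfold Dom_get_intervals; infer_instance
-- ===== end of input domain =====

-- B replaces the running-position accumulator loop with divide and conquer:
-- solve each half recursively and shift the right half's intervals by the left half's total length.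

-- ===== PORT A =====
def get_intervals (words : List String) : List (Int × Int) :=
  (words.foldl
    (fun (st : PySem.Set (Int × Int) × Int) w =>
      let start := st.2
      let e := start + PySem.Str.len w
      (PySem.Set.add st.1 (start, e), e))
    (PySem.Set.empty, 0)).1

-- ===== PORT B =====
-- words[:mid] / words[mid:] with 0 ≤ mid ≤ len are take/drop (= PySem.List.slice_to / slice_from, exact here)
def get_intervals_alt (words : List String) : List (Int × Int) :=
  match words with
  | [] => []
  | [w] => PySem.Set.ofList [((0 : Int), PySem.Str.len w)]
  | w1 :: w2 :: rest =>
    let ws := w1 :: w2 :: rest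
    let mid := ws.length / 2
    let left := ws.take mid
    let right := ws.drop mid
    let shift := left.foldl (fun a w => a + PySem.Str.len w) 0
    PySem.Set.union (get_intervals_alt left)
      ((get_intervals_alt right).map (fun p => (p.1 + shift, p.2 + shift)))
termination_by words.length
decreasing_by
  · simp [List.length_take]
    omega
  · simp [List.length_drop]
    omega

-- ===== PRECONDITION & SPEC =====
def Spec_get_intervals (words : List String) (out : List (Int × Int)) : Prop := out = get_intervals_alt words
instance (words : List String) (out : List (Int × Int)) : Decidable (Spec_get_intervals words out) := by unfold Spec_get_intervals; infer_instance

-- ===== CLAIM (what is proved, stated in full; the proofs are below) =====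
def Claim_equal_get_intervals : Prop := ∀ (words : List String), Dom_get_intervals words → Spec_get_intervals words (get_intervals words)

-- ===== LEMMAS AND PROOFS =====

-- the successive (start, end) pairs starting at position c
def pvPairs (c : Int) : List String → List (Int × Int)
  | [] => []
  | w :: ws => (c, c + PySem.Str.len w) :: pvPairs (c + PySem.Str.len w) ws

def pvShift (n : Int) (p : Int × Int) : Int × Int := (p.1 + n, p.2 + n)

theorem pvA_fold (ws : List String) (s : PySem.Set (Int × Int)) (c : Int) :
    (ws.foldl
      (fun (st : PySem.Set (Int × Int) × Int) w =>
        let start := st.2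
        let e := start + PySem.Str.len w
        (PySem.Set.add st.1 (start, e), e)) (s, c)).1
      = List.foldl PySem.Set.add s (pvPairs c ws) := by
  induction ws generalizing s c with
  | nil => simp [pvPairs]
  | cons w ws ih =>
    simp only [List.foldl, pvPairs]
    exact ih _ _

theorem pvAdd_of_mem (s : PySem.Set (Int × Int)) (x : Int × Int) (h : x ∈ s) :
    PySem.Set.add s x = s := by
  simp [PySem.Set.add, h]

theorem pvAdd_of_not_mem (s : PySem.Set (Int × Int)) (x : Int × Int) (h : x ∉ s) :
    PySem.Set.add s x = s ++ [x] := by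
  simp [PySem.Set.add, h]

-- folding Set.add over a deduplicated list is the same as over the original list
theorem pvUpdate_ofList (ys : List (Int × Int)) (s : PySem.Set (Int × Int)) :
    List.foldl PySem.Set.add s (PySem.Set.ofList ys) = List.foldl PySem.Set.add s ys := by
  induction ys using List.reverseRecOn with
  | nil => simp [PySem.Set.ofList, PySem.Set.empty]
  | append_singleton ys y ih =>
    have hof : PySem.Set.ofList (ys ++ [y]) = PySem.Set.add (PySem.Set.ofList ys) y := by
      simp [PySem.Set.ofList, List.foldl_append]
    by_cases hy : y ∈ ys
    · have h1 : PySem.Set.ofList (ys ++ [y]) = PySem.Set.ofList ys := by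
        rw [hof, pvAdd_of_mem _ _ ((PySem.Set.mem_ofList ys y).mpr hy)]
      have h2 : y ∈ List.foldl PySem.Set.add s ys := by
        have := (PySem.Set.mem_update s ys y).mpr (Or.inr hy)
        simpa [PySem.Set.update] using this
      rw [h1, ih, List.foldl_append]
      simp [pvAdd_of_mem _ _ h2]
    · have h1 : PySem.Set.ofList (ys ++ [y]) = PySem.Set.ofList ys ++ [y] := by
        rw [hof, pvAdd_of_not_mem]
        intro hmem
        exact hy ((PySem.Set.mem_ofList ys y).mp hmem)
      rw [h1, List.foldl_append, List.foldl_append, ih]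

-- Set.add commutes with an injective shift of every element
theorem pvMap_fold (n : Int) (xs : List (Int × Int)) (s : PySem.Set (Int × Int)) :
    List.foldl PySem.Set.add (s.map (pvShift n)) (xs.map (pvShift n))
      = (List.foldl PySem.Set.add s xs).map (pvShift n) := by
  induction xs generalizing s with
  | nil => simp
  | cons x xs ih =>
    have hmem : pvShift n x ∈ s.map (pvShift n) ↔ x ∈ s := by
      constructor
      · intro h
        obtain ⟨y, hy, hxy⟩ := List.mem_map.mp h
        have : y = x := by
          unfold pvShift at hxy
          obtain ⟨hxy1, hxy2⟩ := Prod.mk.injEq .. ▸ hxy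
          exact Prod.ext (by omega) (by omega)
        exact this ▸ hy
      · intro h; exact List.mem_map.mpr ⟨x, h, rfl⟩
    have hadd : PySem.Set.add (s.map (pvShift n)) (pvShift n x)
        = (PySem.Set.add s x).map (pvShift n) := by
      by_cases hx : x ∈ s
      · rw [pvAdd_of_mem _ _ (hmem.mpr hx), pvAdd_of_mem _ _ hx]
      · rw [pvAdd_of_not_mem _ _ (fun h => hx (hmem.mp h)),
            pvAdd_of_not_mem _ _ hx]
        simp [pvShift]
    simp only [List.map_cons, List.foldl_cons, hadd]
    exact ih _

theorem pvPairs_shift (c : Int) (ws : List String) :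
    pvPairs c ws = (pvPairs 0 ws).map (pvShift c) := by
  induction ws generalizing c with
  | nil => simp [pvPairs]
  | cons w ws ih =>
    simp only [pvPairs, List.map_cons]
    rw [ih (c + PySem.Str.len w), ih (0 + PySem.Str.len w), List.map_map]
    congr 1
    · simp [pvShift, Prod.ext_iff]
      omega
    · refine List.map_congr_left ?_
      intro p _
      simp [pvShift, Prod.ext_iff]
      constructor <;> omega

def pvLen (ws : List String) : Int := ws.foldl (fun a w => a + PySem.Str.len w) 0

theorem pvLen_foldl (ws : List String) (c : Int) :
    ws.foldl (fun a w => a + PySem.Str.len w) c = c + pvLen ws := by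
  induction ws generalizing c with
  | nil => simp [pvLen]
  | cons w ws ih =>
    simp only [List.foldl, pvLen]
    rw [ih (c + PySem.Str.len w), ih (0 + PySem.Str.len w)]
    omega

theorem pvLen_cons (w : String) (l : List String) :
    pvLen (w :: l) = PySem.Str.len w + pvLen l := by
  have h : pvLen (w :: l)
      = List.foldl (fun a w => a + PySem.Str.len w) (0 + PySem.Str.len w) l := rfl
  rw [h, pvLen_foldl]
  omega

theorem pvPairs_append (l r : List String) (c : Int) :
    pvPairs c (l ++ r) = pvPairs c l ++ pvPairs (c + pvLen l) r := by
  induction l generalizing c with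
  | nil => simp [pvPairs, pvLen]
  | cons w l ih =>
    simp only [List.cons_append, pvPairs, List.cons.injEq, true_and]
    rw [ih (c + PySem.Str.len w), pvLen_cons]
    have : c + PySem.Str.len w + pvLen l = c + (PySem.Str.len w + pvLen l) := by omega
    rw [this]

theorem pvOfList_append (xs ys : List (Int × Int)) :
    PySem.Set.ofList (xs ++ ys) = List.foldl PySem.Set.add (PySem.Set.ofList xs) ys := by
  simp [PySem.Set.ofList, List.foldl_append]

theorem pvLen_def (l : List String) :
    List.foldl (fun a w => a + PySem.Str.len w) 0 l = pvLen l := rfl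

theorem pvCombine (left right : List String) (shift : Int) (hs : shift = pvLen left) :
    PySem.Set.union (PySem.Set.ofList (pvPairs 0 left))
        ((PySem.Set.ofList (pvPairs 0 right)).map
          (fun p : Int × Int => (p.1 + shift, p.2 + shift)))
      = PySem.Set.ofList (pvPairs 0 (left ++ right)) := by
  have hmap : (PySem.Set.ofList (pvPairs 0 right)).map (pvShift shift)
      = PySem.Set.ofList ((pvPairs 0 right).map (pvShift shift)) := by
    have := pvMap_fold shift (pvPairs 0 right) []
    simpa [PySem.Set.ofList, PySem.Set.empty] using this.symm
  have hfun : ((PySem.Set.ofList (pvPairs 0 right)).map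
        (fun p : Int × Int => (p.1 + shift, p.2 + shift)))
      = (PySem.Set.ofList (pvPairs 0 right)).map (pvShift shift) := rfl
  calc PySem.Set.union (PySem.Set.ofList (pvPairs 0 left))
        ((PySem.Set.ofList (pvPairs 0 right)).map
          (fun p : Int × Int => (p.1 + shift, p.2 + shift)))
      = List.foldl PySem.Set.add (PySem.Set.ofList (pvPairs 0 left))
          (PySem.Set.ofList ((pvPairs 0 right).map (pvShift shift))) := by
        rw [hfun, hmap]; rfl
    _ = List.foldl PySem.Set.add (PySem.Set.ofList (pvPairs 0 left))
          ((pvPairs 0 right).map (pvShift shift)) := pvUpdate_ofList _ _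
    _ = PySem.Set.ofList (pvPairs 0 left ++ (pvPairs 0 right).map (pvShift shift)) :=
        (pvOfList_append _ _).symm
    _ = PySem.Set.ofList (pvPairs 0 (left ++ right)) := by
        rw [pvPairs_append left right 0, ← pvPairs_shift, hs]
        have : (0 : Int) + pvLen left = pvLen left := by omega
        rw [this]

theorem pvB_eq (ws : List String) :
    get_intervals_alt ws = PySem.Set.ofList (pvPairs 0 ws) := by
  induction ws using get_intervals_alt.induct with
  | case1 =>
    rw [get_intervals_alt]
    rfl
  | case2 w =>
    rw [get_intervals_alt]
    have h : pvPairs 0 [w] = [((0 : Int), 0 + PySem.Str.len w)] := rfl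
    rw [h]
    norm_num
  | case3 w1 w2 rest ws mid left right ihl ihr =>
    simp only [ws, mid, left, right] at ihl ihr
    rw [get_intervals_alt, ihl, ihr]
    rw [pvCombine _ _ _ (pvLen_def _), List.take_append_drop]

-- ===== VERDICT =====
theorem get_intervals_spec : Claim_equal_get_intervals := by
  intro words _
  show get_intervals words = get_intervals_alt words
  unfold get_intervals
  rw [pvA_fold, pvB_eq]
  rfl
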